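-- pv_equiv track=rewrite | github.com/shreevatsa/sanskrit | identifier.py | _SplitQuarters
-- ===== SOURCE A (Python) =====
-- def _SplitQuarters(full_pattern):
--   """Attempt splits at quarters."""
--   def Cumulative(ns):
--     """Prefix sums. Example: [5, 4, 3] -> [5, 9, 12]."""
--     # return [sum(ns[:i+1]) for i in range(len(ns))]
--     s = 0
--     out = []
--     for n in ns:
--       s += n
--       out.append(s)
--     return out
--
--   splits = []
--   mss = []
--   n = len(full_pattern)
--   if n % 4 == 0:
--     m = n // 4
--     mss.append(Cumulative([m, m, m]))
--   elif n % 4 == 1: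
--     # The extra syllable could be in any of the four _pāda_s
--     m = (n - 1) // 4
--     mss.append(Cumulative([m + 1, m, m]))
--     mss.append(Cumulative([m, m + 1, m]))
--     mss.append(Cumulative([m, m, m + 1]))
--     mss.append(Cumulative([m, m, m]))
--   elif n % 4 == 2:
--     # Either we have two extra syllables...
--     m = (n - 2) // 4
--     mss.append(Cumulative([m + 1, m + 1, m]))
--     mss.append(Cumulative([m + 1, m, m + 1]))
--     mss.append(Cumulative([m + 1, m, m]))
--     mss.append(Cumulative([m, m + 1, m + 1]))
--     mss.append(Cumulative([m, m + 1, m]))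
--     mss.append(Cumulative([m, m, m + 1]))
--     # ... or we're missing two
--     m = (n + 2) // 4
--     mss.append(Cumulative([m - 1, m - 1, m]))
--     mss.append(Cumulative([m - 1, m, m - 1]))
--     mss.append(Cumulative([m - 1, m, m]))
--     mss.append(Cumulative([m, m - 1, m - 1]))
--     mss.append(Cumulative([m, m - 1, m]))
--     mss.append(Cumulative([m, m, m - 1]))
--   else:
--     assert n % 4 == 3
--     m = (n + 1) // 4
--     # The missing syllable could be in any of the four _pāda_s
--     mss.append(Cumulative([m - 1, m, m]))
--     mss.append(Cumulative([m, m - 1, m]))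
--     mss.append(Cumulative([m, m, m - 1]))
--     mss.append(Cumulative([m, m, m]))
--   for ms in mss:
--     splits.append([full_pattern[:ms[0]],
--                    full_pattern[ms[0]:ms[1]],
--                    full_pattern[ms[1]:ms[2]],
--                    full_pattern[ms[2]:]])
--   return splits
-- ===== SOURCE B (Python) =====
-- def _SplitQuarters(full_pattern):
--   """Attempt splits at quarters (deviation-spec formulation)."""
--   def combos(start, k):
--     # k-subsets of {start, ..., 3}, lexicographic
--     if k == 0:
--       return [[]]
--     out = []
--     for i in range(start, 4):
--       for rest in combos(i + 1, k - 1):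
--         out.append([i] + rest)
--     return out
--
--   n = len(full_pattern)
--   r = n % 4
--   if r == 0:
--     specs = [(0, 1)]
--   elif r == 1:
--     specs = [(1, 1)]
--   elif r == 2:
--     specs = [(2, 1), (2, -1)]
--   else:
--     specs = [(1, -1)]
--
--   splits = []
--   for k, sign in specs:
--     m = (n - r) // 4 if sign == 1 else (n + (4 - r)) // 4
--     for combo in combos(0, k):
--       sizes = [m + sign if i in combo else m for i in range(4)]
--       c0 = sizes[0]
--       c1 = c0 + sizes[1]
--       c2 = c1 + sizes[2]
--       splits.append([full_pattern[:c0], full_pattern[c0:c1],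
--                      full_pattern[c1:c2], full_pattern[c2:]])
--   return splits
-- ===== Notes on version B (the rewrite author's own statement) =====
-- stated objective: alternative
-- what changed: Replaces A's hand-enumerated per-residue lists of quarter-size triples with per-residue (k, sign) deviation specs expanded through lexicographic k-combinations of the four pada positions, slicing inline per combination.
import Mathlib
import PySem

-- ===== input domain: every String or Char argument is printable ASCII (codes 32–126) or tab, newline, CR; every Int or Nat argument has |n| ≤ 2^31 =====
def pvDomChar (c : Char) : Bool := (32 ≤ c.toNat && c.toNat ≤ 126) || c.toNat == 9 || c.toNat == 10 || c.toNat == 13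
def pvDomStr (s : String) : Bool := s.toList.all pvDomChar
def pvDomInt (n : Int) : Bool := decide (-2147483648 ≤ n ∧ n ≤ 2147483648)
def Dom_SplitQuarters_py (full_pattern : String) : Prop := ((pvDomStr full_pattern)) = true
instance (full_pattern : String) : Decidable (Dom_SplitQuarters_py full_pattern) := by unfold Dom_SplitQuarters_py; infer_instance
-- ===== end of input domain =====

-- B replaces A's hand-enumerated quarter-size lists by per-residue deviation specs expanded
-- through lexicographic k-combinations of the four pāda positions (objective: alternative).

-- ===== PORT A =====
-- Cumulative: the inner helper, a running-sum loop appending to `out`.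
def CumulativeA (ns : List Int) : List Int :=
  (ns.foldl (fun (st : Int × List Int) x => (st.1 + x, st.2 ++ [st.1 + x])) (0, [])).2

def SplitQuarters_py (full_pattern : String) : List (List String) :=
  let n : Int := PySem.Str.len full_pattern
  let mss : List (List Int) :=
    if PySem.Int.mod n 4 = 0 then
      let m := PySem.Int.floordiv n 4
      [CumulativeA [m, m, m]]
    else if PySem.Int.mod n 4 = 1 then
      let m := PySem.Int.floordiv (n - 1) 4
      [CumulativeA [m + 1, m, m], CumulativeA [m, m + 1, m],
       CumulativeA [m, m, m + 1], CumulativeA [m, m, m]]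
    else if PySem.Int.mod n 4 = 2 then
      let m := PySem.Int.floordiv (n - 2) 4
      let m' := PySem.Int.floordiv (n + 2) 4
      [CumulativeA [m + 1, m + 1, m], CumulativeA [m + 1, m, m + 1],
       CumulativeA [m + 1, m, m], CumulativeA [m, m + 1, m + 1],
       CumulativeA [m, m + 1, m], CumulativeA [m, m, m + 1],
       CumulativeA [m' - 1, m' - 1, m'], CumulativeA [m' - 1, m', m' - 1],
       CumulativeA [m' - 1, m', m'], CumulativeA [m', m' - 1, m' - 1],
       CumulativeA [m', m' - 1, m'], CumulativeA [m', m', m' - 1]]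
    else
      let m := PySem.Int.floordiv (n + 1) 4
      [CumulativeA [m - 1, m, m], CumulativeA [m, m - 1, m],
       CumulativeA [m, m, m - 1], CumulativeA [m, m, m]]
  -- ms[0], ms[1], ms[2] always exist (length 3): pyGetD is exact here
  mss.foldl (fun splits ms =>
    splits ++ [[PySem.Str.slice full_pattern none (some (PySem.List.pyGetD ms 0 0)),
                PySem.Str.slice full_pattern (some (PySem.List.pyGetD ms 0 0)) (some (PySem.List.pyGetD ms 1 0)),
                PySem.Str.slice full_pattern (some (PySem.List.pyGetD ms 1 0)) (some (PySem.List.pyGetD ms 2 0)),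
                PySem.Str.slice full_pattern (some (PySem.List.pyGetD ms 2 0)) none]]) []

-- ===== PORT B =====
-- combos start k = all k-subsets of {start,…,3}, lexicographic (Source B's `combos`)
def combosB (start : Nat) (k : Nat) : List (List Nat) :=
  match k with
  | 0 => [[]]
  | Nat.succ k' =>
      (List.range' start (4 - start)).foldl
        (fun out i => out ++ (combosB (i + 1) k').map (fun rest => i :: rest)) []

def SplitQuarters_py_alt (full_pattern : String) : List (List String) :=
  let n : Int := PySem.Str.len full_pattern
  let r := PySem.Int.mod n 4
  let specs : List (Nat × Int) :=
    if r = 0 then [(0, 1)]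
    else if r = 1 then [(1, 1)]
    else if r = 2 then [(2, 1), (2, -1)]
    else [(1, -1)]
  specs.foldl (fun splits ks =>
    let m := if ks.2 = 1 then PySem.Int.floordiv (n - r) 4
             else PySem.Int.floordiv (n + (4 - r)) 4
    (combosB 0 ks.1).foldl (fun splits combo =>
      let sizes := (List.range 4).map (fun i => if i ∈ combo then m + ks.2 else m)
      let c0 := PySem.List.pyGetD sizes 0 0
      let c1 := c0 + PySem.List.pyGetD sizes 1 0
      let c2 := c1 + PySem.List.pyGetD sizes 2 0
      splits ++ [[PySem.Str.slice full_pattern none (some c0),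
                  PySem.Str.slice full_pattern (some c0) (some c1),
                  PySem.Str.slice full_pattern (some c1) (some c2),
                  PySem.Str.slice full_pattern (some c2) none]]) splits) []

-- ===== PRECONDITION & SPEC =====
def Spec_SplitQuarters_py (full_pattern : String) (out : List (List String)) : Prop := out = SplitQuarters_py_alt full_pattern
instance (full_pattern : String) (out : List (List String)) : Decidable (Spec_SplitQuarters_py full_pattern out) := by unfold Spec_SplitQuarters_py; infer_instance

-- ===== CLAIM (what is proved, stated in full; the proofs are below) =====
def Claim_equal_SplitQuarters_py : Prop := ∀ (full_pattern : String), Dom_SplitQuarters_py full_pattern → Spec_SplitQuarters_py full_pattern (SplitQuarters_py full_pattern)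

-- ===== LEMMAS AND PROOFS =====
theorem combosB_zero : combosB 0 0 = [[]] := by decide
theorem combosB_one : combosB 0 1 = [[0], [1], [2], [3]] := by decide
theorem combosB_two : combosB 0 2 = [[0, 1], [0, 2], [0, 3], [1, 2], [1, 3], [2, 3]] := by decide

-- ===== VERDICT (by name: the statement is the Claim_ definition above) =====
theorem SplitQuarters_py_spec : Claim_equal_SplitQuarters_py := by
  intro fp _
  unfold Spec_SplitQuarters_py SplitQuarters_py SplitQuarters_py_alt
  have h0 : 0 ≤ PySem.Int.mod (PySem.Str.len fp) 4 := PySem.Int.mod_nonneg _ (by norm_num)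
  have h4 : PySem.Int.mod (PySem.Str.len fp) 4 < 4 := PySem.Int.mod_lt _ (by norm_num)
  set n := PySem.Str.len fp with hn
  have : PySem.Int.mod n 4 = 0 ∨ PySem.Int.mod n 4 = 1 ∨
         PySem.Int.mod n 4 = 2 ∨ PySem.Int.mod n 4 = 3 := by omega
  rcases this with h | h | h | h <;>
  · simp only [h]
    simp [CumulativeA, combosB_zero, combosB_one, combosB_two, List.range_succ, List.foldl, PySem.List.pyGetD_ofNat', ← sub_eq_add_neg]
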